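-- pv_equiv track=rewrite | github.com/jaychsu/algorithm | other/find_ways_in_board_game.py | find_ways_in_board_game
-- ===== SOURCE A (Python) =====
-- def find_ways_in_board_game(n):
--     if not n or n < 2:
--         return 1
--
--     dp = [0] * (n + 1)
--     dp[0] = 1
--
--     for i in range(1, min(n + 1, 6)):
--         for j in range(i):
--             dp[i] += dp[j]
--
--     for i in range(6, n + 1):
--         dp[i] = sum((
--             dp[i - 1],
--             dp[i - 2],
--             dp[i - 3],
--             dp[i - 4],
--             dp[i - 5],
--             dp[i - 6],
--         ))
--
--     return dp[n]
-- ===== SOURCE B (Python) =====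
-- def find_ways_in_board_game(n):
--     if not n or n < 2:
--         return 1
--     # Matrix exponentiation of the 6x6 companion matrix of the six-step recurrence:
--     # answer = (M^n)[0][0], computed with O(log n) matrix squarings.
--     def mul(X, Y):
--         return [[sum(X[i][k] * Y[k][j] for k in range(6)) for j in range(6)]
--                 for i in range(6)]
--     M = [[1, 1, 1, 1, 1, 1],
--          [1, 0, 0, 0, 0, 0],
--          [0, 1, 0, 0, 0, 0],
--          [0, 0, 1, 0, 0, 0],
--          [0, 0, 0, 1, 0, 0],
--          [0, 0, 0, 0, 1, 0]]
--     R = [[1 if i == j else 0 for j in range(6)] for i in range(6)]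
--     e = n
--     while e:
--         if e & 1:
--             R = mul(R, M)
--         M = mul(M, M)
--         e >>= 1
--     return R[0][0]
-- ===== Notes on version B (the rewrite author's own statement) =====
-- stated objective: faster
-- what changed: Replaces A's O(n) dp-array recurrence with exponentiation-by-squaring of the 6x6 companion matrix, reading the answer off entry (0,0) of M^n, so only O(log n) matrix multiplications are performed.
import Mathlib
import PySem

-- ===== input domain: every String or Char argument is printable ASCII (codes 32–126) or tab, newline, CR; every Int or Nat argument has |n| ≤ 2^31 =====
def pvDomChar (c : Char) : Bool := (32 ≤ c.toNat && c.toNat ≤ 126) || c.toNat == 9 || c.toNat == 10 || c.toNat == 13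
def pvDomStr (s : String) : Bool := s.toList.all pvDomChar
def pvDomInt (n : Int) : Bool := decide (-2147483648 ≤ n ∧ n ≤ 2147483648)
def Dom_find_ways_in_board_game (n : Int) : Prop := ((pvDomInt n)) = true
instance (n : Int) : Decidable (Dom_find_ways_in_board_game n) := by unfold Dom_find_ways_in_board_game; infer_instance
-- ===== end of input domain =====

-- B replaces A's linear dp-array recurrence by exponentiation-by-squaring of the 6x6
-- companion matrix (answer = (M^n)[0][0]): an asymptotically different, O(log n)-step algorithm.

-- ===== PORT A =====
def find_ways_in_board_game (n : Int) : Int :=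
  if n = 0 ∨ n < 2 then 1
  else
    PySem.List.pyGetD
      ((PySem.List.pyRange 6 (n + 1) 1).foldl (fun dp i =>
          PySem.List.pySetD dp i
            (0 + PySem.List.pyGetD dp (i - 1) 0 + PySem.List.pyGetD dp (i - 2) 0
               + PySem.List.pyGetD dp (i - 3) 0 + PySem.List.pyGetD dp (i - 4) 0
               + PySem.List.pyGetD dp (i - 5) 0 + PySem.List.pyGetD dp (i - 6) 0))
        ((PySem.List.pyRange 1 (min (n + 1) 6) 1).foldl (fun dp i =>
            (PySem.List.pyRange 0 i 1).foldl (fun dp j =>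
              PySem.List.pySetD dp i
                (PySem.List.pyGetD dp i 0 + PySem.List.pyGetD dp j 0)) dp)
          (PySem.List.pySetD (PySem.List.pyRepeat [(0 : Int)] (n + 1)) 0 1)))
      n 0

-- ===== PORT B =====
-- Source B's mul: entry (i,j) = sum over k of X[i][k]*Y[k][j]; all operands in Source B are 6x6
-- lists, so every index is in range and List.getD _ 0 / getD _ [] is exact there.
def pvMulL (X Y : List (List Int)) : List (List Int) :=
  (List.range 6).map fun i => (List.range 6).map fun j =>
    ((List.range 6).map fun k => ((X.getD i []).getD k 0) * ((Y.getD k []).getD j 0)).sum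

-- Source B's literal companion matrix M
def pvM0L : List (List Int) :=
  [[1, 1, 1, 1, 1, 1],
   [1, 0, 0, 0, 0, 0],
   [0, 1, 0, 0, 0, 0],
   [0, 0, 1, 0, 0, 0],
   [0, 0, 0, 1, 0, 0],
   [0, 0, 0, 0, 1, 0]]

-- Source B's hand-built identity R = [[1 if i==j else 0 for j in range(6)] for i in range(6)]
def pvIdL : List (List Int) :=
  (List.range 6).map fun i => (List.range 6).map fun j => if i = j then 1 else 0

-- the while-loop: while e: (if e&1: R = mul(R,M)); M = mul(M,M); e >>= 1
def pvPowLoopL (R M : List (List Int)) (e : Nat) : List (List Int) :=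
  if e = 0 then R
  else pvPowLoopL (if e % 2 = 1 then pvMulL R M else R) (pvMulL M M) (e / 2)
  termination_by e
  decreasing_by omega

def find_ways_in_board_game_alt (n : Int) : Int :=
  if n = 0 ∨ n < 2 then 1
  else  -- e = n; n >= 2 here so toNat is exact, and R is always 6x6 so R[0][0] = getD 0
    ((pvPowLoopL pvIdL pvM0L n.toNat).getD 0 []).getD 0 0

-- ===== PRECONDITION & SPEC =====
def Spec_find_ways_in_board_game (n : Int) (out : Int) : Prop := out = find_ways_in_board_game_alt n
instance (n : Int) (out : Int) : Decidable (Spec_find_ways_in_board_game n out) := by unfold Spec_find_ways_in_board_game; infer_instance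

-- ===== CLAIM (what is proved, stated in full; the proofs are below) =====
def Claim_equal_find_ways_in_board_game : Prop := ∀ (n : Int), Dom_find_ways_in_board_game n → Spec_find_ways_in_board_game n (find_ways_in_board_game n)

-- ===== LEMMAS AND PROOFS =====

-- the six-value window after k steps of the recurrence
def pvStepB (w : Int × Int × Int × Int × Int × Int) : Int × Int × Int × Int × Int × Int :=
  match w with
  | (a, b, c, d, e, f) => (b, c, d, e, f, a + b + c + d + e + f)

def pvW : Nat → Int × Int × Int × Int × Int × Int
  | 0 => (0, 0, 0, 0, 0, 1)
  | k + 1 => pvStepB (pvW k)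

-- the hexanacci value, 0 on negative indices
def pvG (k : Int) : Int := if k < 0 then 0 else (pvW k.toNat).2.2.2.2.2

-- A's dp array after entries ≤ i have been filled
def pvD (n i : Int) : List Int :=
  (PySem.List.pyRange 0 (n + 1) 1).map (fun j => if j ≤ i then pvG j else 0)

theorem pvG_natCast (k : Nat) : pvG (k : Int) = (pvW k).2.2.2.2.2 := by
  simp [pvG]

theorem pvW_eq (k : Nat) :
    pvW k = (pvG ((k : Int) - 5), pvG ((k : Int) - 4), pvG ((k : Int) - 3),
             pvG ((k : Int) - 2), pvG ((k : Int) - 1), pvG (k : Int)) := by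
  induction k with
  | zero => decide
  | succ k ih =>
    have hlast : pvG ((k + 1 : Nat) : Int) = (pvStepB (pvW k)).2.2.2.2.2 := by
      rw [pvG_natCast]; rfl
    have hstep : pvW (k + 1) = pvStepB (pvW k) := rfl
    rw [hstep, ih]
    simp only [pvStepB]
    refine Prod.ext ?_ (Prod.ext ?_ (Prod.ext ?_ (Prod.ext ?_ (Prod.ext ?_ ?_)))) <;> simp only
    · congr 1; push_cast; ring
    · congr 1; push_cast; ring
    · congr 1; push_cast; ring
    · congr 1; push_cast; ring
    · congr 1; push_cast; ring
    · rw [hlast, ih]; simp only [pvStepB]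

theorem pvG_rec (k : Int) (hk : 1 ≤ k) :
    pvG k = pvG (k - 1) + pvG (k - 2) + pvG (k - 3) + pvG (k - 4) + pvG (k - 5) + pvG (k - 6) := by
  obtain ⟨m, hm⟩ : ∃ m : Nat, k = (m : Int) + 1 := ⟨(k - 1).toNat, by omega⟩
  subst hm
  have h1 : pvG ((m : Int) + 1) = (pvStepB (pvW m)).2.2.2.2.2 := by
    have : ((m : Int) + 1) = ((m + 1 : Nat) : Int) := by push_cast; ring
    rw [this, pvG_natCast]; rfl
  rw [h1, pvW_eq m]
  simp only [pvStepB]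
  have e1 : (m : Int) + 1 - 1 = (m : Int) := by ring
  have e2 : (m : Int) + 1 - 2 = (m : Int) - 1 := by ring
  have e3 : (m : Int) + 1 - 3 = (m : Int) - 2 := by ring
  have e4 : (m : Int) + 1 - 4 = (m : Int) - 3 := by ring
  have e5 : (m : Int) + 1 - 5 = (m : Int) - 4 := by ring
  have e6 : (m : Int) + 1 - 6 = (m : Int) - 5 := by ring
  rw [e1, e2, e3, e4, e5, e6]; ring

-- ---- B side: list matrices viewed as Mathlib matrices; the loop computes R * M^e ----

def pvM0 : Matrix (Fin 6) (Fin 6) Int :=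
  !![1,1,1,1,1,1;
     1,0,0,0,0,0;
     0,1,0,0,0,0;
     0,0,1,0,0,0;
     0,0,0,1,0,0;
     0,0,0,0,1,0]

def pvToMat (L : List (List Int)) : Matrix (Fin 6) (Fin 6) Int :=
  Matrix.of fun i j => (L.getD i.val []).getD j.val 0

theorem pvGetD_map_range {a : Type} [Inhabited a] (f : Nat → a) (i : Nat) (h : i < 6) (d : a) :
    ((List.range 6).map f).getD i d = f i := by
  rw [List.getD_eq_getElem _ _ (by simpa using h), List.getElem_map, List.getElem_range]

theorem pvSum_map_range (g : Nat → Int) :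
    ((List.range 6).map g).sum = g 0 + g 1 + g 2 + g 3 + g 4 + g 5 := by
  simp [List.range_succ]; ring

theorem pvToMat_mul (X Y : List (List Int)) :
    pvToMat (pvMulL X Y) = pvToMat X * pvToMat Y := by
  ext i j
  rw [Matrix.mul_apply, Fin.sum_univ_six]
  show (((pvMulL X Y).getD i.val []).getD j.val 0) = _
  rw [pvMulL, pvGetD_map_range _ _ i.isLt, pvGetD_map_range _ _ j.isLt, pvSum_map_range]
  simp [pvToMat]

theorem pvToMat_id : pvToMat pvIdL = 1 := by
  ext i j
  fin_cases i <;> fin_cases j <;> rfl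

theorem pvToMat_M0 : pvToMat pvM0L = pvM0 := by
  ext i j
  fin_cases i <;> fin_cases j <;> rfl

theorem powLoop_eq (e : Nat) : ∀ R M : List (List Int),
    pvToMat (pvPowLoopL R M e) = pvToMat R * pvToMat M ^ e := by
  induction e using Nat.strong_induction_on with
  | _ e ih =>
    intro R M
    rw [pvPowLoopL]
    by_cases h0 : e = 0
    · simp [h0]
    · rw [if_neg h0, ih (e / 2) (by omega)]
      have hMM : pvToMat (pvMulL M M) = pvToMat M ^ 2 := by rw [pvToMat_mul, sq]
      by_cases h1 : e % 2 = 1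
      · rw [if_pos h1, pvToMat_mul, hMM, ← pow_mul, mul_assoc, ← pow_succ']
        congr 2
        omega
      · rw [if_neg h1, hMM, ← pow_mul]
        congr 2
        omega

-- ---- B side: M^k acting on the state vector ----

-- the state vector after k steps: entry j holds pvG (k - j)
def pvVec (k : Int) : Fin 6 → Int := fun j => pvG (k - (j : Int))

theorem pvM0_step (k : Int) (hk : 0 ≤ k) :
    pvM0.mulVec (pvVec k) = pvVec (k + 1) := by
  funext j
  fin_cases j <;>
    simp [Matrix.mulVec, dotProduct, Fin.sum_univ_six, pvM0, pvVec]
  · rw [pvG_rec (k + 1) (by omega),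
        show k + 1 - 1 = k by ring, show k + 1 - 2 = k - 1 by ring,
        show k + 1 - 3 = k - 2 by ring, show k + 1 - 4 = k - 3 by ring,
        show k + 1 - 5 = k - 4 by ring, show k + 1 - 6 = k - 5 by ring]
  · congr 1; ring
  · congr 1; ring
  · congr 1; ring
  · congr 1; ring

theorem pvM0_pow_vec (k : Nat) :
    (pvM0 ^ k).mulVec (pvVec 0) = pvVec (k : Int) := by
  induction k with
  | zero => simp
  | succ k ih =>
    rw [pow_succ', ← Matrix.mulVec_mulVec, ih, pvM0_step (k : Int) (by positivity)]
    norm_cast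

theorem pvVec_zero : pvVec 0 = fun j : Fin 6 => if j = 0 then 1 else 0 := by
  funext j
  fin_cases j <;> decide

theorem pvM0_pow_entry (k : Nat) : (pvM0 ^ k) 0 0 = pvG (k : Int) := by
  have h := congrFun (pvM0_pow_vec k) 0
  rw [pvVec_zero] at h
  simp only [Matrix.mulVec, dotProduct, Fin.sum_univ_six] at h
  norm_num at h
  simpa [pvVec] using h

theorem alt_eq_g (n : Int) (h : 2 ≤ n) : find_ways_in_board_game_alt n = pvG n := by
  unfold find_ways_in_board_game_alt
  rw [if_neg (by omega),
      show ((pvPowLoopL pvIdL pvM0L n.toNat).getD 0 []).getD 0 0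
         = pvToMat (pvPowLoopL pvIdL pvM0L n.toNat) 0 0 from rfl,
      powLoop_eq, pvToMat_id, pvToMat_M0, one_mul, pvM0_pow_entry]
  congr 1
  omega

-- ---- A side ----

theorem pvD_length (n i : Int) : (pvD n i).length = (n + 1).toNat := by
  simp [pvD, PySem.List.length_pyRange_one]

theorem pvD_getElem (n i : Int) (k : Nat) (h : k < (pvD n i).length) :
    (pvD n i)[k] = if (k : Int) ≤ i then pvG k else 0 := by
  have hk : k < (PySem.List.pyRange 0 (n + 1) 1).length := by
    simpa [pvD] using h
  simp only [pvD, List.getElem_map, PySem.List.getElem_pyRange_one _ _ _ hk, zero_add]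

theorem getD_pvD (n i j : Int) (h0 : 0 ≤ j) (hj : j ≤ n) :
    PySem.List.pyGetD (pvD n i) j 0 = if j ≤ i then pvG j else 0 := by
  have hl : (pvD n i).length = (n + 1).toNat := pvD_length n i
  rw [PySem.List.pyGetD_eq_getElem _ _ h0 (by rw [hl]; omega)]
  rw [pvD_getElem n i j.toNat (by rw [hl]; omega)]
  rw [Int.toNat_of_nonneg h0]

theorem setD_pvD (n i : Int) (h0 : 0 ≤ i) (_hi : i ≤ n) :
    PySem.List.pySetD (pvD n (i - 1)) i (pvG i) = pvD n i := by
  rw [PySem.List.pySetD_of_nonneg _ _ h0]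
  apply List.ext_getElem
  · simp [pvD_length]
  · intro k h1 h2
    rw [List.getElem_set, pvD_getElem n i k h2]
    have h1' : k < (pvD n (i - 1)).length := by simpa using h1
    rcases eq_or_ne i.toNat k with hk | hk
    · have hki : (k : Int) = i := by omega
      rw [if_pos hk, if_pos (by omega), hki]
    · rw [if_neg hk, pvD_getElem n (i - 1) k h1']
      by_cases hc : (k : Int) ≤ i - 1
      · rw [if_pos hc, if_pos (by omega)]
      · rw [if_neg hc, if_neg (by omega)]

theorem setD_same (n i : Int) (h1 : 1 ≤ i) (_hi : i ≤ n) :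
    pvD n (i - 1) = PySem.List.pySetD (pvD n (i - 1)) i 0 := by
  rw [PySem.List.pySetD_of_nonneg _ _ (by omega)]
  apply List.ext_getElem
  · simp
  · intro k hk1 hk2
    have hk2' : k < (pvD n (i - 1)).length := by simpa using hk2
    rw [List.getElem_set]
    rcases eq_or_ne i.toNat k with hk | hk
    · rw [if_pos hk, pvD_getElem n (i - 1) k hk1, if_neg (by omega)]
    · rw [if_neg hk]

theorem getD_setD (xs : List Int) (i v j : Int) (h0i : 0 ≤ i)
    (h0j : 0 ≤ j) (hjl : j < (xs.length : Int)) :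
    PySem.List.pyGetD (PySem.List.pySetD xs i v) j 0 = if j = i then v else PySem.List.pyGetD xs j 0 := by
  rw [PySem.List.pySetD_of_nonneg _ _ h0i,
      PySem.List.pyGetD_eq_getElem _ _ h0j (by simp; omega),
      PySem.List.pyGetD_eq_getElem _ _ h0j hjl]
  simp only [List.getElem_set]
  rcases eq_or_ne j i with h | h
  · rw [if_pos h, if_pos (by omega)]
  · rw [if_neg h, if_neg (by omega)]

theorem setD_setD (xs : List Int) (i v w : Int) (h0 : 0 ≤ i) :
    PySem.List.pySetD (PySem.List.pySetD xs i v) i w = PySem.List.pySetD xs i w := by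
  rw [PySem.List.pySetD_of_nonneg _ _ h0, PySem.List.pySetD_of_nonneg _ _ h0,
      PySem.List.pySetD_of_nonneg _ _ h0, List.set_set]

-- partial sums of pvG over a range
def pvSum (a b : Int) : Int := ((PySem.List.pyRange a b 1).map pvG).sum

theorem pvSum_nil (a b : Int) (h : b ≤ a) : pvSum a b = 0 := by
  rw [pvSum, PySem.List.pyRange_one_eq_nil h]; rfl

theorem pvSum_cons (a b : Int) (h : a < b) : pvSum a b = pvG a + pvSum (a + 1) b := by
  rw [pvSum, PySem.List.pyRange_one_cons h, List.map_cons, List.sum_cons, pvSum]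

theorem pvSum_eq (i : Int) (h1 : 1 ≤ i) (h5 : i ≤ 5) : pvSum 0 i = pvG i := by
  interval_cases i <;> decide

theorem inner_fold (n i : Int) (h1 : 1 ≤ i) (hi : i ≤ n) (m : Nat) :
    ∀ (a acc : Int), 0 ≤ a → a + m = i →
    (PySem.List.pyRange a i 1).foldl (fun dp j =>
        PySem.List.pySetD dp i (PySem.List.pyGetD dp i 0 + PySem.List.pyGetD dp j 0))
      (PySem.List.pySetD (pvD n (i - 1)) i acc)
    = PySem.List.pySetD (pvD n (i - 1)) i (acc + pvSum a i) := by
  induction m with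
  | zero =>
    intro a acc h0 ha
    rw [PySem.List.pyRange_one_eq_nil (by omega), List.foldl_nil, pvSum_nil _ _ (by omega), add_zero]
  | succ m ih =>
    intro a acc h0 ha
    have hlen : ((pvD n (i - 1)).length : Int) = n + 1 := by rw [pvD_length]; omega
    rw [PySem.List.pyRange_one_cons (by omega), List.foldl_cons]
    have hgi : PySem.List.pyGetD (PySem.List.pySetD (pvD n (i - 1)) i acc) i 0 = acc := by
      rw [getD_setD _ _ _ _ (by omega) (by omega) (by rw [hlen]; omega), if_pos rfl]
    have hga : PySem.List.pyGetD (PySem.List.pySetD (pvD n (i - 1)) i acc) a 0 = pvG a := by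
      rw [getD_setD _ _ _ _ (by omega) (by omega) (by rw [hlen]; omega), if_neg (by omega),
          getD_pvD _ _ _ (by omega) (by omega), if_pos (by omega)]
    rw [hgi, hga, setD_setD _ _ _ _ (by omega)]
    rw [ih (a + 1) (acc + pvG a) (by omega) (by omega)]
    rw [pvSum_cons a i (by omega)]
    ring_nf

theorem inner_total (n i : Int) (h1 : 1 ≤ i) (h5 : i ≤ 5) (hi : i ≤ n) :
    (PySem.List.pyRange 0 i 1).foldl (fun dp j =>
        PySem.List.pySetD dp i (PySem.List.pyGetD dp i 0 + PySem.List.pyGetD dp j 0))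
      (pvD n (i - 1))
    = pvD n i := by
  conv_lhs => rw [setD_same n i h1 hi]
  rw [inner_fold n i h1 hi i.toNat 0 0 le_rfl (by omega), zero_add, pvSum_eq i h1 h5,
      setD_pvD n i (by omega) hi]

theorem phase1 (n : Int) (h : 5 ≤ n) :
    (PySem.List.pyRange 1 (min (n + 1) 6) 1).foldl (fun dp i =>
        (PySem.List.pyRange 0 i 1).foldl (fun dp j =>
          PySem.List.pySetD dp i (PySem.List.pyGetD dp i 0 + PySem.List.pyGetD dp j 0)) dp)
      (pvD n 0)
    = pvD n 5 := by
  have hmin : min (n + 1) 6 = 6 := by omega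
  have hrange : PySem.List.pyRange 1 6 1 = [1, 2, 3, 4, 5] := by decide
  rw [hmin, hrange]
  simp only [List.foldl_cons, List.foldl_nil]
  rw [show pvD n 0 = pvD n (1 - 1) by norm_num, inner_total n 1 (by omega) (by omega) (by omega)]
  rw [show pvD n 1 = pvD n (2 - 1) by norm_num, inner_total n 2 (by omega) (by omega) (by omega)]
  rw [show pvD n 2 = pvD n (3 - 1) by norm_num, inner_total n 3 (by omega) (by omega) (by omega)]
  rw [show pvD n 3 = pvD n (4 - 1) by norm_num, inner_total n 4 (by omega) (by omega) (by omega)]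
  rw [show pvD n 4 = pvD n (5 - 1) by norm_num, inner_total n 5 (by omega) (by omega) (by omega)]

theorem phase2 (n : Int) (_hn : 5 ≤ n) (m : Nat) :
    ∀ (a : Int), 6 ≤ a → a + m = n + 1 →
    (PySem.List.pyRange a (n + 1) 1).foldl (fun dp i =>
        PySem.List.pySetD dp i
          (0 + PySem.List.pyGetD dp (i - 1) 0 + PySem.List.pyGetD dp (i - 2) 0
             + PySem.List.pyGetD dp (i - 3) 0 + PySem.List.pyGetD dp (i - 4) 0
             + PySem.List.pyGetD dp (i - 5) 0 + PySem.List.pyGetD dp (i - 6) 0))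
      (pvD n (a - 1))
    = pvD n n := by
  induction m with
  | zero =>
    intro a h6 ha
    rw [PySem.List.pyRange_one_eq_nil (by omega), List.foldl_nil]
    congr 1; omega
  | succ m ih =>
    intro a h6 ha
    rw [PySem.List.pyRange_one_cons (by omega), List.foldl_cons]
    have hg : ∀ k : Int, 1 ≤ k → k ≤ 6 →
        PySem.List.pyGetD (pvD n (a - 1)) (a - k) 0 = pvG (a - k) := by
      intro k hk1 hk6
      rw [getD_pvD _ _ _ (by omega) (by omega), if_pos (by omega)]
    rw [hg 1 (by omega) (by omega), hg 2 (by omega) (by omega), hg 3 (by omega) (by omega),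
        hg 4 (by omega) (by omega), hg 5 (by omega) (by omega), hg 6 (by omega) (by omega)]
    have hsum : 0 + pvG (a - 1) + pvG (a - 2) + pvG (a - 3) + pvG (a - 4) + pvG (a - 5) + pvG (a - 6)
        = pvG a := by
      rw [pvG_rec a (by omega)]; ring
    rw [hsum, setD_pvD n a (by omega) (by omega)]
    have := ih (a + 1) (by omega) (by omega)
    rw [show a + 1 - 1 = a by ring] at this
    exact this

theorem setup_eq (n : Int) (_h : 2 ≤ n) :
    PySem.List.pySetD (PySem.List.pyRepeat [(0 : Int)] (n + 1)) 0 1 = pvD n 0 := by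
  rw [PySem.List.pyRepeat_singleton, PySem.List.pySetD_of_nonneg _ _ le_rfl]
  apply List.ext_getElem
  · simp [pvD_length]
  · intro k h1 h2
    rw [List.getElem_set, List.getElem_replicate, pvD_getElem n 0 k h2]
    rcases Nat.eq_zero_or_pos k with hk | hk
    · subst hk
      norm_num
      decide
    · rw [if_neg (by omega), if_neg (by omega)]

theorem a_eq_g (n : Int) (h : 5 ≤ n) : find_ways_in_board_game n = pvG n := by
  unfold find_ways_in_board_game
  rw [if_neg (by omega), setup_eq n (by omega), phase1 n h,
      show pvD n 5 = pvD n (6 - 1) by norm_num,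
      phase2 n h (n - 5).toNat 6 le_rfl (by omega),
      getD_pvD n n n (by omega) le_rfl, if_pos le_rfl]

-- ===== VERDICT (by name: the statement is the Claim_ definition above) =====
theorem find_ways_in_board_game_spec : Claim_equal_find_ways_in_board_game := by
  intro n _
  unfold Spec_find_ways_in_board_game
  by_cases h2 : n < 2
  · unfold find_ways_in_board_game find_ways_in_board_game_alt
    rw [if_pos (Or.inr h2), if_pos (Or.inr h2)]
  · rw [alt_eq_g n (by omega)]
    by_cases h5 : n ≤ 4
    · have : n = 2 ∨ n = 3 ∨ n = 4 := by omega
      rcases this with h | h | h <;> subst h <;> decide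
    · exact a_eq_g n (by omega)
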